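-- pv_equiv track=rewrite | github.com/clifton/twag | twag/fetcher/bird_cli.py | _is_auth_failure
-- ===== SOURCE A (Python) =====
-- def _is_auth_failure(stderr: str) -> bool:
--     lower = stderr.lower()
--     return any(
--         token in lower
--         for token in (
--             "auth",
--             "unauthorized",
--             "forbidden",
--             "login",
--             "cookie",
--             "ct0",
--             "auth_token",
--             "csrf",
--             "403",
--         )
--     )
-- ===== SOURCE B (Python) =====
-- _TOKENS = ("auth", "unauthorized", "forbidden", "login", "cookie",
--            "ct0", "auth_token", "csrf", "403")
--
--
-- def _is_auth_failure(stderr: str) -> bool: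
--     lower = stderr.lower()
--     # single position-major pass: at each index, test whether any token starts here
--     for i in range(len(lower)):
--         for t in _TOKENS:
--             if lower.startswith(t, i):
--                 return True
--     return False
-- ===== Notes on version B (the rewrite author's own statement) =====
-- stated objective: alternative
-- what changed: A runs one separate substring scan per token (9 passes over the string); B makes a single left-to-right pass over positions and at each position checks whether any token starts there, returning at the first matching position.
import Mathlib
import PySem

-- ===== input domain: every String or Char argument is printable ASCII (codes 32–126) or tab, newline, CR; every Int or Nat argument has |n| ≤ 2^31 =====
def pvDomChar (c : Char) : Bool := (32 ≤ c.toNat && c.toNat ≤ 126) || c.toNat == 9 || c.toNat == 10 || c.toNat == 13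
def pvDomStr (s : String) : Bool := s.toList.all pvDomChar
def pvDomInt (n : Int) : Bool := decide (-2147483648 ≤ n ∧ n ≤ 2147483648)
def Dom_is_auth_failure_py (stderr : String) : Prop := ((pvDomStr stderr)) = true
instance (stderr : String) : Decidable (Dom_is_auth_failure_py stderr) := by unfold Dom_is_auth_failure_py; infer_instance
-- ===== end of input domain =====

-- B replaces A's token-major scan (one substring scan per token) by a single
-- position-major pass checking all tokens at each position; alternative, same cost.

-- ===== PORT A =====
-- lower = stderr.lower(); any(token in lower for token in (...))
def is_auth_failure_py (stderr : String) : Bool :=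
  let lower := PySem.Str.lower stderr
  ["auth", "unauthorized", "forbidden", "login", "cookie",
   "ct0", "auth_token", "csrf", "403"].any (fun token => PySem.Str.isIn token lower)

-- ===== PORT B =====
-- the token tuple _TOKENS, as char lists
def pvTokens : List (List Char) :=
  ["auth".toList, "unauthorized".toList, "forbidden".toList, "login".toList,
   "cookie".toList, "ct0".toList, "auth_token".toList, "csrf".toList, "403".toList]

-- the position-major pass: for i in range(len(s)): for t in _TOKENS: if s.startswith(t, i): return True
-- (the suffix s.drop i is consumed structurally; startswith(t, i) is a prefix test on that suffix)
def pvScan (s : List Char) : Bool :=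
  match s with
  | [] => false
  | _ :: rest =>
      if pvTokens.any (fun t => PySem.Chars.startswith s t) then true
      else pvScan rest

def is_auth_failure_py_alt (stderr : String) : Bool :=
  let lower := PySem.Str.lower stderr
  pvScan lower.toList

-- ===== PRECONDITION & SPEC =====
def Spec_is_auth_failure_py (stderr : String) (out : Bool) : Prop := out = is_auth_failure_py_alt stderr
instance (stderr : String) (out : Bool) : Decidable (Spec_is_auth_failure_py stderr out) := by unfold Spec_is_auth_failure_py; infer_instance

-- ===== CLAIM (what is proved, stated in full; the proofs are below) =====
def Claim_equal_is_auth_failure_py : Prop := ∀ (stderr : String), Dom_is_auth_failure_py stderr → Spec_is_auth_failure_py stderr (is_auth_failure_py stderr)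

-- ===== LEMMAS AND PROOFS =====

-- any distributes over || pointwise
theorem pv_any_or {α : Type} (l : List α) (f g : α → Bool) :
    l.any (fun t => f t || g t) = (l.any f || l.any g) := by
  induction l with
  | nil => simp
  | cons x xs ih =>
      simp [List.any_cons, ih]
      cases f x <;> cases g x <;> simp

-- 'sub in (c :: rest)' splits into 'starts here' or 'sub in rest'
theorem pv_isIn_cons (t : List Char) (c : Char) (rest : List Char) :
    PySem.Chars.isIn t (c :: rest) =
      (PySem.Chars.startswith (c :: rest) t || PySem.Chars.isIn t rest) := by
  rcases h : PySem.Chars.isIn t (c :: rest) with _ | _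
  · have hn := (PySem.Chars.isIn_eq_false_iff t (c :: rest)).mp h
    rw [List.infix_cons_iff] at hn
    push Not at hn
    have h1 : PySem.Chars.startswith (c :: rest) t = false := by
      rcases hb : PySem.Chars.startswith (c :: rest) t with _ | _
      · rfl
      · exact absurd ((PySem.Chars.startswith_iff (c :: rest) t).mp hb) hn.1
    have h2 : PySem.Chars.isIn t rest = false := by
      rcases hb : PySem.Chars.isIn t rest with _ | _
      · rfl
      · exact absurd ((PySem.Chars.isIn_iff_infix t rest).mp hb) hn.2
    simp [h1, h2]
  · have hi := (PySem.Chars.isIn_iff_infix t (c :: rest)).mp h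
    rw [List.infix_cons_iff] at hi
    rcases hi with hp | hi
    · simp [(PySem.Chars.startswith_iff (c :: rest) t).mpr hp]
    · simp [(PySem.Chars.isIn_iff_infix t rest).mpr hi]

-- the position-major pass computes the token-major any
theorem pvScan_eq (s : List Char) :
    pvScan s = pvTokens.any (fun t => PySem.Chars.isIn t s) := by
  induction s with
  | nil => decide
  | cons c rest ih =>
      have hfun : (fun t => PySem.Chars.isIn t (c :: rest)) =
          (fun t => PySem.Chars.startswith (c :: rest) t || PySem.Chars.isIn t rest) :=
        funext (fun t => pv_isIn_cons t c rest)
      rw [pvScan, hfun, pv_any_or, ← ih]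
      cases h : pvTokens.any (fun t => PySem.Chars.startswith (c :: rest) t) <;> simp

-- ===== VERDICT (by name: the statement is the Claim_ definition above) =====
theorem is_auth_failure_py_spec : Claim_equal_is_auth_failure_py := by
  intro stderr _
  unfold Spec_is_auth_failure_py is_auth_failure_py is_auth_failure_py_alt
  rw [pvScan_eq]
  simp [pvTokens, PySem.Str.isIn_eq]
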